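-- pv_equiv track=rewrite | github.com/symjamie/EMSE_DevInt | python/lib/JSONReader.py | get_duplicate_question_indices
-- ===== SOURCE A (Python) =====
-- from collections import defaultdict
--
-- def get_duplicate_question_indices(questions):
--     index_dict = defaultdict(list)
--
--     for question in range(0, len(questions['items'])):
--         question_id = questions['items'][question]['question_id']
--         index_dict[question_id].append(question)
--
--     # Slice first index of every question
--     for question_id in index_dict:
--         index_dict[question_id] = index_dict[question_id][1:]
--
--     return index_dict
-- ===== SOURCE B (Python) =====
-- from collections import defaultdict
--
-- def get_duplicate_question_indices(questions):
--     ids = [item['question_id'] for item in questions['items']]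
--     return defaultdict(list, {
--         qid: [i for i, x in enumerate(ids) if x == qid][1:]
--         for qid in dict.fromkeys(ids)
--     })
-- ===== Notes on version B (the rewrite author's own statement) =====
-- stated objective: alternative
-- what changed: A incrementally builds a dict of index lists in one loop and slices each list's head in a second loop over the dict; B extracts the id list once, dedups it, and builds the result with a dict comprehension that collects each distinct id's indices by a direct scan and drops the first.
import Mathlib
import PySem

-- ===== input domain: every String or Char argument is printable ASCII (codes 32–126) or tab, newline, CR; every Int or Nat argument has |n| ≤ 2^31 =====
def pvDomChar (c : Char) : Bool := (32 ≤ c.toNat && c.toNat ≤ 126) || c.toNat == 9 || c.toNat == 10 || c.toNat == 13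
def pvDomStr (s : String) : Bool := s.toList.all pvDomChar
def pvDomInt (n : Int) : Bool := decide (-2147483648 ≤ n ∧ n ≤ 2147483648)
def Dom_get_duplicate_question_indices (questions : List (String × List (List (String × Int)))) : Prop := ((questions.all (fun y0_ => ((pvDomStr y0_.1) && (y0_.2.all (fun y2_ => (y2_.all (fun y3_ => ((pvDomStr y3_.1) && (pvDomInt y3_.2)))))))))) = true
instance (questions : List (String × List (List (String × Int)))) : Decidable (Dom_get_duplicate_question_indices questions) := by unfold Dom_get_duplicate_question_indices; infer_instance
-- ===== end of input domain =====

-- B replaces A's incremental dict building (group indices per id in a dict, then a second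
-- loop slicing each entry's head) by a dict comprehension: dedup the id list once, and for
-- each distinct id collect its indices by a direct scan and drop the first.

-- ===== PORT A =====
-- Python A: build index_dict[qid] = all indices of qid (loop over range(0, len(items))),
-- then a second loop re-assigns each entry to its [1:] slice; returns the dict (its items list here).
-- items[question] with question ∈ range(0, len(items)) is always in range, so it is ported as pyGetD.
def get_duplicate_question_indices (questions : List (String × List (List (String × Int)))) : List (Int × List Int) :=
  match (PySem.Dict.mk questions).get? "items" with
  | none => []  -- KeyError 'items' in Python: excluded by Pre_
  | some items =>
    let d := (PySem.List.pyRange 0 (PySem.List.len items)).foldl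
      (fun d q =>
        match (PySem.Dict.mk (PySem.List.pyGetD items q [])).get? "question_id" with
        | none => d  -- KeyError 'question_id' in Python: excluded by Pre_
        | some qid => d.modify qid [] (· ++ [q]))
      PySem.Dict.empty
    let d2 := d.keys.foldl (fun d' k => d'.insert k (PySem.List.slice (d'.getD k []) (some 1) none)) d
    d2.items

-- ===== PORT B =====
-- Python B: ids = [item['question_id'] for item in questions['items']]; a dict comprehension
-- over dict.fromkeys(ids) maps each distinct id to [i for i, x in enumerate(ids) if x == qid][1:].
-- item['question_id'] is ported total (default 0): inputs where it would raise KeyError are outside Pre_.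
def qidOf (item : List (String × Int)) : Int := (PySem.Dict.mk item).getD "question_id" 0

def get_duplicate_question_indices_alt (questions : List (String × List (List (String × Int)))) : List (Int × List Int) :=
  match (PySem.Dict.mk questions).get? "items" with
  | none => []  -- KeyError 'items' in Python: excluded by Pre_
  | some items =>
    let ids := items.map qidOf
    (PySem.List.dedup ids).map (fun qid =>
      (qid, PySem.List.slice (((PySem.List.enumerate ids).filter (fun p => p.2 == qid)).map (·.1))
              (some 1) none))

-- ===== PRECONDITION & SPEC =====
-- Pre_ excludes exactly the inputs where the Python raises KeyError: a missing 'items' key,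
-- or an item dict without a 'question_id' key.
def Pre_get_duplicate_question_indices (questions : List (String × List (List (String × Int)))) : Prop :=
  (PySem.Dict.mk questions).contains "items" = true ∧
  ∀ item ∈ (PySem.Dict.mk questions).getD "items" [],
    (PySem.Dict.mk item).contains "question_id" = true
instance (questions : List (String × List (List (String × Int)))) : Decidable (Pre_get_duplicate_question_indices questions) := by unfold Pre_get_duplicate_question_indices; infer_instance

def pvWitness_get_duplicate_question_indices : (List (String × List (List (String × Int)))) :=
  [("items", [[("question_id", 1)], [("question_id", 2)], [("question_id", 1)]])]

def Spec_get_duplicate_question_indices (questions : List (String × List (List (String × Int)))) (out : List (Int × List Int)) : Prop := out = get_duplicate_question_indices_alt questions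
instance (questions : List (String × List (List (String × Int)))) (out : List (Int × List Int)) : Decidable (Spec_get_duplicate_question_indices questions out) := by unfold Spec_get_duplicate_question_indices; infer_instance

-- ===== CLAIM (what is proved, stated in full; the proofs are below) =====
def Claim_equal_get_duplicate_question_indices : Prop := ∀ (questions : List (String × List (List (String × Int)))), Dom_get_duplicate_question_indices questions → Pre_get_duplicate_question_indices questions → Spec_get_duplicate_question_indices questions (get_duplicate_question_indices questions)

-- ===== LEMMAS AND PROOFS =====

-- A's first-loop body, as a step over an (index, item) pair
def stepA (d : PySem.Dict Int (List Int)) (p : Int × List (String × Int)) : PySem.Dict Int (List Int) :=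
  match (PySem.Dict.mk p.2).get? "question_id" with
  | none => d
  | some qid => d.modify qid [] (· ++ [p.1])

-- the second loop of A: re-assigning every key to its tail maps every item's value to its tail
theorem pass2_items (ks : List Int) (d : PySem.Dict Int (List Int))
    (hnd : d.keys.Nodup) (hks : ∀ k ∈ ks, d.contains k = true) (hknd : ks.Nodup) :
    (ks.foldl (fun d' k => d'.insert k (PySem.List.slice (d'.getD k []) (some 1) none)) d).items
      = d.items.map (fun p => if p.1 ∈ ks then (p.1, p.2.tail) else p) := by
  induction ks generalizing d with
  | nil => simp
  | cons k ks ih =>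
    simp only [List.foldl_cons]
    rw [PySem.List.slice_from_one]
    have hc : d.contains k = true := hks k (List.mem_cons_self ..)
    have hkeys : (d.insert k (d.getD k []).tail).keys = d.keys := by
      exact PySem.Dict.keys_insert_of_contains d _ hc
    have hnd' : (d.insert k (d.getD k []).tail).keys.Nodup := by rw [hkeys]; exact hnd
    rw [ih _ hnd' (by
      intro k' hk'
      rw [PySem.Dict.contains_insert]
      rw [hks k' (List.mem_cons_of_mem _ hk'), Bool.or_true]) (List.nodup_cons.1 hknd).2]
    rw [PySem.Dict.items_insert_of_contains d _ hc, List.map_map]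
    apply List.map_congr_left
    intro p hp
    by_cases hpk : p.1 = k
    · have : d.getD k [] = p.2 := by
        have := PySem.Dict.getD_of_mem_items d (k := p.1) (v := p.2) hp hnd []
        rw [hpk] at this; exact this
      simp [Function.comp, hpk, this, (List.nodup_cons.1 hknd).1]
    · simp only [Function.comp]
      have : (p.1 == k) = false := by simp [hpk]
      simp [this, hpk]

-- A's port, rewritten over enumerate
theorem foldA_range_eq (items : List (List (String × Int))) :
    (PySem.List.pyRange 0 (PySem.List.len items)).foldl
      (fun d q =>
        match (PySem.Dict.mk (PySem.List.pyGetD items q [])).get? "question_id" with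
        | none => d
        | some qid => d.modify qid [] (· ++ [q]))
      PySem.Dict.empty
    = (PySem.List.enumerate items).foldl stepA PySem.Dict.empty := by
  rw [PySem.List.enumerate_eq_map_pyRange items [], List.foldl_map]
  rfl

-- under Pre_, A's step with the KeyError branch is a plain modify keyed by qidOf
theorem stepA_eq_modify (items : List (List (String × Int)))
    (hq : ∀ item ∈ items, (PySem.Dict.mk item).contains "question_id" = true)
    (d : PySem.Dict Int (List Int)) (p : Int × List (String × Int))
    (hp : p ∈ PySem.List.enumerate items) :
    stepA d p = d.modify (qidOf p.2) [] (· ++ [p.1]) := by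
  have hmem : p.2 ∈ items := by
    rw [← PySem.List.map_snd_enumerate items 0]
    exact List.mem_map.2 ⟨p, hp, rfl⟩
  have hc := hq p.2 hmem
  rw [PySem.Dict.contains_eq_isSome_get?] at hc
  unfold stepA qidOf
  cases hg : (PySem.Dict.mk p.2).get? "question_id" with
  | none => rw [hg] at hc; simp at hc
  | some qid => rw [PySem.Dict.getD_eq_get?_getD, hg]; rfl

-- enumerate commutes with map on the elements
theorem enumerate_map {α β : Type} (f : α → β) (l : List α) (s : Int) :
    PySem.List.enumerate (l.map f) s = (PySem.List.enumerate l s).map (fun p => (p.1, f p.2)) := by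
  induction l generalizing s with
  | nil => rfl
  | cons a t ih => simp [PySem.List.enumerate_cons, ih]

-- ===== VERDICT (by name: the statement is the Claim_ definition above) =====
theorem get_duplicate_question_indices_spec : Claim_equal_get_duplicate_question_indices := by
  intro questions _ hpre
  obtain ⟨hitems, hq⟩ := hpre
  unfold Spec_get_duplicate_question_indices
  unfold get_duplicate_question_indices get_duplicate_question_indices_alt
  cases hg : (PySem.Dict.mk questions).get? "items" with
  | none =>
    rw [PySem.Dict.contains_eq_isSome_get?, hg] at hitems
  | some items =>
    simp only
    have hq' : ∀ item ∈ items, (PySem.Dict.mk item).contains "question_id" = true := by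
      intro item him
      exact hq item (by rw [PySem.Dict.getD_eq_get?_getD, hg]; exact him)
    rw [foldA_range_eq]
    rw [PySem.List.foldl_congr_mem _ _ _ _ (fun d p hp => stepA_eq_modify items hq' d p hp)]
    set F := (PySem.List.enumerate items).foldl
      (fun d p => d.modify (qidOf p.2) [] (· ++ [p.1])) PySem.Dict.empty with hF
    -- keys of F are the distinct ids, in first-occurrence order
    have hmapkey : (PySem.List.enumerate items).map (fun p => qidOf p.2) = items.map qidOf := by
      conv_rhs => rw [← PySem.List.map_snd_enumerate items 0]
      rw [List.map_map]
      rfl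
    have hkeysgen := PySem.Dict.keys_foldl_modify_key (PySem.List.enumerate items)
      (fun p => qidOf p.2) [] (fun _ p v => v ++ [p.1]) PySem.Dict.empty
    have hkeys : F.keys = PySem.List.dedup (items.map qidOf) := by
      rw [hF, hkeysgen, PySem.Dict.keys_empty, hmapkey, PySem.List.dedup_eq_ofList]
      exact PySem.Set.update_nil_left _
    have hnd : F.keys.Nodup := by
      rw [hF]
      exact PySem.Dict.nodup_keys_foldl_modify_key (PySem.List.enumerate items)
        (fun p => qidOf p.2) [] (fun _ p v => v ++ [p.1]) _ (by simp [PySem.Dict.empty])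
    -- the value F stores at k: all indices whose item has id k
    have hgetD : ∀ k, F.getD k [] =
        ((PySem.List.enumerate (items.map qidOf)).filter (fun p => p.2 == k)).map (·.1) := by
      intro k
      have hl : F = ((PySem.List.enumerate items).map (fun p => (qidOf p.2, p.1))).foldl
          (fun d p => d.modify p.1 [] (· ++ [p.2])) PySem.Dict.empty := by
        rw [hF, List.foldl_map]
      rw [hl, PySem.Dict.getD_foldl_modify_append, PySem.Dict.getD_empty, List.nil_append,
        List.filter_map, List.map_map, enumerate_map qidOf items 0, List.filter_map, List.map_map]
      rfl
    rw [pass2_items F.keys F hnd (fun k hk => (PySem.Dict.contains_iff_mem_keys F k).2 hk) hnd,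
      PySem.Dict.items_eq_map_keys F hnd [], List.map_map]
    rw [hkeys]
    apply List.map_congr_left
    intro k _
    simp only [Function.comp]
    rw [if_pos (by rw [← hkeys]; exact (by rw [hkeys]; assumption : k ∈ F.keys))]
    rw [hgetD k, PySem.List.slice_from_one]
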